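-- pv_equiv track=rewrite | github.com/NicosProtopapas/DynamicRidesharing | src/Grid.py | is_valid_order
-- ===== SOURCE A (Python) =====
-- def is_valid_order(order):
--     """
--         check if an order is valid;
--         This can put in a preprocessing case--> create a table
--     """
--
--     visited_origin = set([])
--     for o in order:
--         if o[1] == 'o':
--             visited_origin.add(o[0])
--         if o[1] == 'd' and o[0] not in visited_origin:
--             return False
--     return True
-- ===== SOURCE B (Python) =====
-- def is_valid_order(order):
--     """Reverse scan: maintain the set of destination ids still awaiting an earlier origin."""
--     pending = set()
--     for o in reversed(order):
--         if o[1] == 'd':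
--             pending.add(o[0])
--         elif o[1] == 'o':
--             pending.discard(o[0])
--     return not pending
-- ===== Notes on version B (the rewrite author's own statement) =====
-- stated objective: alternative
-- what changed: Traverses the order in reverse maintaining a set of destination ids still awaiting a preceding origin (discarded when their origin appears), returning whether that set is empty, instead of a forward scan accumulating seen origins with an early False return.
import Mathlib
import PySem

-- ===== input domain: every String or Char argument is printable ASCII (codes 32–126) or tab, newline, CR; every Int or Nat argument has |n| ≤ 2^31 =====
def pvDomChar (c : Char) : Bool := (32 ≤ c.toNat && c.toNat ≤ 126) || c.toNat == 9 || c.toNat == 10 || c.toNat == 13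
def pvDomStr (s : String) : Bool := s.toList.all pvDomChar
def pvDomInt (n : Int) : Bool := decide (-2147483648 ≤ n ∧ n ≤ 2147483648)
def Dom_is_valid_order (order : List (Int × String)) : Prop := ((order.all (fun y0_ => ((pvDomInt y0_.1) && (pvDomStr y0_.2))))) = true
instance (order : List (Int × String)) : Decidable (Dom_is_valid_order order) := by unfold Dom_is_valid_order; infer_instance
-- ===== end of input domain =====

-- B replaces A's forward scan of seen origins by a reverse scan of still-unmet destinations (alternative decomposition, same cost).


-- ===== PORT A =====
-- forward scan: accumulate the set of origin ids seen so far; return False at a destination not yet covered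
def is_valid_order_go (visited : PySem.Set Int) : List (Int × String) → Bool
  | [] => true
  | o :: rest =>
    let visited' := if o.2 == "o" then PySem.Set.add visited o.1 else visited
    if o.2 == "d" && !(PySem.Set.contains visited' o.1) then false
    else is_valid_order_go visited' rest

def is_valid_order_alt_step (pending : PySem.Set Int) (o : Int × String) : PySem.Set Int :=
  if o.2 == "d" then PySem.Set.add pending o.1
  else if o.2 == "o" then PySem.Set.discard pending o.1
  else pending


def is_valid_order (order : List (Int × String)) : Bool :=
  is_valid_order_go PySem.Set.empty order

-- ===== PORT B =====
def is_valid_order_alt (order : List (Int × String)) : Bool :=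
  (order.reverse.foldl is_valid_order_alt_step PySem.Set.empty).isEmpty

-- ===== PRECONDITION & SPEC =====
def Spec_is_valid_order (order : List (Int × String)) (out : Bool) : Prop := out = is_valid_order_alt order
instance (order : List (Int × String)) (out : Bool) : Decidable (Spec_is_valid_order order out) := by unfold Spec_is_valid_order; infer_instance

-- ===== CLAIM (what is proved, stated in full; the proofs are below) =====
def Claim_equal_is_valid_order : Prop := ∀ (order : List (Int × String)), Dom_is_valid_order order → Spec_is_valid_order order (is_valid_order order)

-- ===== LEMMAS AND PROOFS =====

-- the pending set B computes, as a function of the list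
def pvPend (order : List (Int × String)) : PySem.Set Int :=
  order.reverse.foldl is_valid_order_alt_step PySem.Set.empty

theorem pvPend_cons (x : Int × String) (rest : List (Int × String)) :
    pvPend (x :: rest) = is_valid_order_alt_step (pvPend rest) x := by
  simp [pvPend, List.reverse_cons, List.foldl_append]

theorem pvGo_iff (l : List (Int × String)) : ∀ visited : PySem.Set Int,
    is_valid_order_go visited l = true ↔ ∀ i ∈ pvPend l, i ∈ visited := by
  induction l with
  | nil => intro visited; simp [is_valid_order_go, pvPend]
  | cons x rest ih =>
    intro visited
    rw [pvPend_cons]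
    by_cases hd : x.2 = "d"
    · have e1 : (("d":String) == "o") = false := by decide
      have e2 : (("d":String) == "d") = true := by decide
      simp only [is_valid_order_go, is_valid_order_alt_step, hd, e1, e2, Bool.false_eq_true,
        if_false, if_true, Bool.true_and]
      by_cases hv : x.1 ∈ visited
      · rw [(PySem.Set.contains_iff _ _).mpr hv]
        simp only [Bool.not_true, Bool.false_eq_true, if_false, ih]
        constructor
        · rintro h i hi
          rcases (PySem.Set.mem_add _ _ _).mp hi with hi' | rfl
          · exact h i hi'
          · exact hv
        · intro h i hi
          exact h i ((PySem.Set.mem_add _ _ _).mpr (Or.inl hi))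
      · have hc : PySem.Set.contains visited x.1 = false := by
          rw [← Bool.not_eq_true]
          exact fun h => hv ((PySem.Set.contains_iff _ _).mp h)
        rw [hc]
        simp only [Bool.not_false, if_true, Bool.false_eq_true, false_iff]
        intro h
        exact hv (h x.1 ((PySem.Set.mem_add _ _ _).mpr (Or.inr rfl)))
    · by_cases ho : x.2 = "o"
      · have e1 : (("o":String) == "d") = false := by decide
        have e2 : (("o":String) == "o") = true := by decide
        simp only [is_valid_order_go, is_valid_order_alt_step, ho, e1, e2, Bool.false_and,
          Bool.false_eq_true, if_false, if_true]
        rw [ih]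
        constructor
        · intro h i hi
          rcases (PySem.Set.mem_discard _ _ _).mp hi with ⟨hi', hne⟩
          rcases (PySem.Set.mem_add _ _ _).mp (h i hi') with h' | rfl
          · exact h'
          · exact absurd rfl hne
        · intro h i hi
          by_cases he : i = x.1
          · exact (PySem.Set.mem_add _ _ _).mpr (Or.inr he)
          · exact (PySem.Set.mem_add _ _ _).mpr
              (Or.inl (h i ((PySem.Set.mem_discard _ _ _).mpr ⟨hi, he⟩)))
      · have hnd : (x.2 == "d") = false := by simp [hd]
        have hno : (x.2 == "o") = false := by simp [ho]
        simp only [is_valid_order_go, is_valid_order_alt_step, hnd, hno, Bool.false_and,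
          Bool.false_eq_true, if_false]
        exact ih visited

-- ===== VERDICT (by name: the statement is the Claim_ definition above) =====
theorem is_valid_order_spec : Claim_equal_is_valid_order := by
  intro order _
  show is_valid_order order = is_valid_order_alt order
  rw [Bool.eq_iff_iff]
  rw [show is_valid_order_alt order = (pvPend order).isEmpty from rfl]
  rw [show is_valid_order order = is_valid_order_go PySem.Set.empty order from rfl]
  rw [pvGo_iff]
  simp [List.isEmpty_iff, PySem.Set.empty, List.eq_nil_iff_forall_not_mem]
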